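-- pv_equiv track=rewrite | github.com/dhsong95/programmers-algorithm-challenges | 연습문제 LV4/올바른 괄호의 갯수.py | count_valid_parenthesis
-- ===== SOURCE A (Python) =====
-- def count_valid_parenthesis(p, closed, n):
--     if len(p) == (2*n):
--         return int(closed == 0)
--
--     counter = 0
--     if not closed:
--         counter += count_valid_parenthesis(p+'(', closed+1, n)
--     else:
--         counter += count_valid_parenthesis(p+'(', closed+1, n)
--         counter += count_valid_parenthesis(p+')', closed-1, n)
--
--     return counter
-- ===== SOURCE B (Python) =====
-- def count_valid_parenthesis(p, closed, n):
--     # Bottom-up DP on (remaining length, open count) instead of exponential recursion.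
--     L = 2 * n - len(p)
--     if L < 0:
--         return 0
--     W = 2 * L + 1
--     # row[i] = number of valid continuations from open count (closed - L + i)
--     row = [int(closed - L + i == 0) for i in range(W)]
--     for _ in range(L):
--         row = [(row[i + 1] if i + 1 < W else 0)
--                + (row[i - 1] if i - 1 >= 0 and closed - L + i != 0 else 0)
--                for i in range(W)]
--     return row[L]
-- ===== Notes on version B (the rewrite author's own statement) =====
-- stated objective: alternative
-- what changed: Replaces A's exponential branching recursion over all continuations by a bottom-up dynamic-programming table indexed by (remaining length, open count).
import Mathlib
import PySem

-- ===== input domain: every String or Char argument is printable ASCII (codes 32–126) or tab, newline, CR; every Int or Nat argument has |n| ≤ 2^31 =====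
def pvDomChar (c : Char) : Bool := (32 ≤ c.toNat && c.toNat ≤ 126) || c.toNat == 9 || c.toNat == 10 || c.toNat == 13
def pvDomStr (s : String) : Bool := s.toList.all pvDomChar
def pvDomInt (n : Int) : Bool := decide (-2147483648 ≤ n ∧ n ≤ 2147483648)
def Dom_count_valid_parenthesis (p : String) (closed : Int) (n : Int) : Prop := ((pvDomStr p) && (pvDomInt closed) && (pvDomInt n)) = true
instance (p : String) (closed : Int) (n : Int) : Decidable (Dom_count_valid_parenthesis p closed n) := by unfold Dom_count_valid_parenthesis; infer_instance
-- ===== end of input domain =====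

-- B replaces A's exponential branching recursion by a bottom-up DP table over
-- (remaining length, open count); same return value on all of Pre_.

-- ===== PORT A =====
-- Fuel = number of characters still to append, + 1; under Pre_ the fuel never
-- runs out, so this is a literal transliteration of A's recursion.
def count_valid_parenthesis_go : Nat → String → Int → Int → Int
  | 0, _, _, _ => 0
  | fuel + 1, p, closed, n =>
    if PySem.Str.len p = 2 * n then (if closed = 0 then 1 else 0)
    else
      let counter : Int := 0
      if closed = 0 then
        counter + count_valid_parenthesis_go fuel (p ++ "(") (closed + 1) n
      else
        counter + count_valid_parenthesis_go fuel (p ++ "(") (closed + 1) n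
                + count_valid_parenthesis_go fuel (p ++ ")") (closed - 1) n

def count_valid_parenthesis (p : String) (closed : Int) (n : Int) : Int :=
  count_valid_parenthesis_go ((2 * n - PySem.Str.len p).toNat + 1) p closed n

-- ===== PORT B =====
-- row[i] is the count for open count (closed - L + i); indices 0 .. 2L.
def pvRow0 (closed L W : Int) : List Int :=
  (PySem.List.pyRange 0 W 1).map (fun i => if closed - L + i = 0 then 1 else 0)

def pvStep (closed L W : Int) (row : List Int) : List Int :=
  (PySem.List.pyRange 0 W 1).map (fun i =>
    (if i + 1 < W then PySem.List.pyGetD row (i + 1) 0 else 0)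
    + (if 0 ≤ i - 1 ∧ closed - L + i ≠ 0 then PySem.List.pyGetD row (i - 1) 0 else 0))

def count_valid_parenthesis_alt (p : String) (closed : Int) (n : Int) : Int :=
  let L : Int := 2 * n - PySem.Str.len p
  if L < 0 then 0
  else
    let W : Int := 2 * L + 1
    PySem.List.pyGetD
      ((PySem.List.pyRange 0 L 1).foldl (fun row _ => pvStep closed L W row) (pvRow0 closed L W))
      L 0

-- ===== PRECONDITION & SPEC =====
-- Pre_ excludes exactly the inputs with len(p) > 2n, on which A never reaches the
-- stopping length and recurses forever (RecursionError); on the rest A returns.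
def Pre_count_valid_parenthesis (p : String) (closed : Int) (n : Int) : Prop :=
  0 ≤ 2 * n - PySem.Str.len p
instance (p : String) (closed : Int) (n : Int) : Decidable (Pre_count_valid_parenthesis p closed n) := by
  unfold Pre_count_valid_parenthesis; infer_instance

def pvWitness_count_valid_parenthesis : String × Int × Int := ("((", 2, 3)

def Spec_count_valid_parenthesis (p : String) (closed : Int) (n : Int) (out : Int) : Prop := out = count_valid_parenthesis_alt p closed n
instance (p : String) (closed : Int) (n : Int) (out : Int) : Decidable (Spec_count_valid_parenthesis p closed n out) := by unfold Spec_count_valid_parenthesis; infer_instance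

-- ===== CLAIM (what is proved, stated in full; the proofs are below) =====
def Claim_equal_count_valid_parenthesis : Prop := ∀ (p : String) (closed : Int) (n : Int), Dom_count_valid_parenthesis p closed n → Pre_count_valid_parenthesis p closed n → Spec_count_valid_parenthesis p closed n (count_valid_parenthesis p closed n)


-- ===== LEMMAS AND PROOFS =====

-- Counts of valid continuations: fCnt L c = number of ±1 walks of length L from
-- open count c to 0 in which a step down is forbidden at 0.
def fCnt : Nat → Int → Int
  | 0, c => if c = 0 then 1 else 0
  | L + 1, c => fCnt L (c + 1) + (if c = 0 then 0 else fCnt L (c - 1))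

theorem go_eq_fCnt (L : Nat) : ∀ (fuel : Nat) (p : String) (closed n : Int),
    PySem.Str.len p = 2 * n - L → L < fuel →
    count_valid_parenthesis_go fuel p closed n = fCnt L closed := by
  induction L with
  | zero =>
    intro fuel p closed n hlen hfuel
    cases fuel with
    | zero => omega
    | succ fuel =>
    simp only [count_valid_parenthesis_go, fCnt]
    rw [if_pos (by omega)]
  | succ L ih =>
    intro fuel p closed n hlen hfuel
    cases fuel with
    | zero => omega
    | succ fuel =>
    have h1 : PySem.Str.len (p ++ "(") = 2 * n - L := by
      rw [PySem.Str.len_append, hlen, (by decide : PySem.Str.len "(" = 1)]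
      push_cast; ring
    have h2 : PySem.Str.len (p ++ ")") = 2 * n - L := by
      rw [PySem.Str.len_append, hlen, (by decide : PySem.Str.len ")" = 1)]
      push_cast; ring
    simp only [count_valid_parenthesis_go]
    rw [if_neg (by rw [hlen]; push_cast; omega)]
    by_cases hc : closed = 0
    · rw [if_pos hc, ih fuel (p ++ "(") (closed + 1) n h1 (by omega)]
      simp [fCnt, hc]
    · rw [if_neg hc, ih fuel (p ++ "(") (closed + 1) n h1 (by omega),
        ih fuel (p ++ ")") (closed - 1) n h2 (by omega)]
      simp only [fCnt, if_neg hc]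
      ring

-- The truncated DP value B computes at level k, index i.
def gRow (closed L W : Int) : Nat → Int → Int
  | 0, i => if closed - L + i = 0 then 1 else 0
  | k + 1, i =>
    (if i + 1 < W then gRow closed L W k (i + 1) else 0)
    + (if 0 ≤ i - 1 ∧ closed - L + i ≠ 0 then gRow closed L W k (i - 1) else 0)

theorem iterate_step_eq_map (closed L W : Int) (k : Nat) :
    (pvStep closed L W)^[k] (pvRow0 closed L W)
      = (PySem.List.pyRange 0 W 1).map (fun i => gRow closed L W k i) := by
  induction k with
  | zero => simp [pvRow0, gRow]
  | succ k ih =>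
    rw [Function.iterate_succ_apply', ih]
    unfold pvStep
    refine List.map_congr_left (fun i hi => ?_)
    have hmem := (PySem.List.mem_pyRange_one.mp hi)
    simp only [gRow]
    congr 1
    · split_ifs with h
      · rw [PySem.List.pyGetD_map_pyRange_of_nonneg _ W (i + 1) 0 (by omega) (by omega)]
      · rfl
    · split_ifs with h
      · rw [PySem.List.pyGetD_map_pyRange_of_nonneg _ W (i - 1) 0 h.1 (by omega)]
      · rfl

theorem foldl_const_eq_iterate {α β : Type} (f : α → α) (l : List β) :
    ∀ (a : α), l.foldl (fun r _ => f r) a = f^[l.length] a := by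
  induction l with
  | nil => intro a; rfl
  | cons x l ih =>
    intro a
    simp [List.foldl_cons, ih, Function.iterate_succ_apply]

theorem gRow_eq_fCnt (closed L : Int) (k : Nat) :
    ∀ (i : Int), (k : Int) ≤ L → 0 ≤ i → i < 2 * L + 1 →
    (if i - L < 0 then L - i else i - L) ≤ L - k →
    gRow closed L (2 * L + 1) k i = fCnt k (closed - L + i) := by
  induction k with
  | zero => intro i _ _ _ _; rfl
  | succ k ih =>
    intro i hk h0 hW habs
    simp only [gRow, fCnt]
    have hkL : (k : Int) ≤ L := by push_cast at hk ⊢; omega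
    rw [if_pos (show i + 1 < 2 * L + 1 by push_cast at hk habs; split_ifs at habs <;> omega)]
    have hi1 : (1 : Int) ≤ i := by push_cast at hk habs; split_ifs at habs <;> omega
    rw [ih (i + 1) hkL (by omega) (by push_cast at hk habs; split_ifs at habs <;> omega)
          (by push_cast at hk habs ⊢; split_ifs at habs ⊢ <;> omega)]
    rw [show closed - L + (i + 1) = closed - L + i + 1 from by ring]
    by_cases hc : closed - L + i = 0
    · rw [if_neg (by omega), if_pos hc]
    · rw [if_pos ⟨by omega, hc⟩, if_neg hc,
        ih (i - 1) hkL (by omega) (by omega)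
          (by push_cast at hk habs ⊢; split_ifs at habs ⊢ <;> omega)]
      rw [show closed - L + (i - 1) = closed - L + i - 1 from by ring]

-- ===== VERDICT (by name: the statement is the Claim_ definition above) =====
theorem count_valid_parenthesis_spec : Claim_equal_count_valid_parenthesis := by
  intro p closed n _ hpre
  have h0 : (0 : Int) ≤ 2 * n - PySem.Str.len p := hpre
  unfold Spec_count_valid_parenthesis count_valid_parenthesis
  simp only [count_valid_parenthesis_alt]
  set L : Int := 2 * n - PySem.Str.len p with hLdef
  rw [if_neg (by omega)]
  have hA : count_valid_parenthesis_go (L.toNat + 1) p closed n = fCnt L.toNat closed := by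
    apply go_eq_fCnt
    · omega
    · omega
  rw [hA, foldl_const_eq_iterate, PySem.List.length_pyRange_one,
    (by omega : (L : Int) - 0 = L), iterate_step_eq_map,
    PySem.List.pyGetD_map_pyRange_of_nonneg _ (2 * L + 1) L 0 (by omega) (by omega),
    gRow_eq_fCnt closed L L.toNat L (by omega) (by omega) (by omega) (by omega)]
  congr 1
  omega
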